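-- pv_equiv track=rewrite | github.com/miliar/Code_Jam_Webscraper | Solutions_python/Problem_201/2396.py | start_allocation
-- ===== SOURCE A (Python) =====
-- from collections import defaultdict
--
-- def calculate_right(empty_stall, right):
--     return right - empty_stall
--
-- def calculate_left(start, empty_stall):
--     return empty_stall - start
--
-- def start_allocation(people, stalls):
--     stall_min_max = defaultdict(list)
--     for stall in range(0, stalls):
--         stall_min_max[stall] = [calculate_left(0, stall), calculate_right(stall, stalls-1)]
--     #print stall_min_max
--     for person in range(0, people):
--         cur_min = -1
--         cur_max = -1
--         for stall in stall_min_max: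
--             left = stall_min_max[stall][0]
--             right = stall_min_max[stall][1]
--             cur_stall = stall
--             stall_min = min(left, right)
--             stall_max = max(left, right)
--             if((stall_min > cur_min) or (stall_min == cur_min and stall_max > cur_max)):
--                 cur_min = stall_min
--                 cur_max = stall_max
--                 the_stall = cur_stall
--         #print "xx", the_stall, person
--         stall_min_max[the_stall] = [-1, -1] # filled
--
--         stall_count = 1
--         while((the_stall - stall_count) >= 0):
--             cur_stall = the_stall - stall_count
--             left_stall = stall_min_max[cur_stall]
--             #print left_stall
--             if(left_stall[0] == -1): break
--             left_stall[1] = the_stall - cur_stall - 1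
--             stall_count += 1
--         stall_count = 1
--         while((stall_count + the_stall) < stalls):
--             cur_stall = the_stall + stall_count
--             right_stall = stall_min_max[cur_stall]
--             if(right_stall[0] == -1): break
--             right_stall[0] = cur_stall - the_stall -1
--             stall_count += 1
--     return cur_max, cur_min
-- ===== SOURCE B (Python) =====
-- def start_allocation(people, stalls):
--     # Track only the lengths of the maximal free runs, left to right,
--     # instead of per-stall distance bookkeeping.
--     segs = [stalls] if stalls > 0 else []
--     ans = (-1, -1)
--     for _ in range(people):
--         if not segs:
--             ans = (-1, -1)  # every stall already occupied
--             break
--         i = segs.index(max(segs))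
--         length = segs.pop(i)
--         ans = (length // 2, (length - 1) // 2)
--         segs[i:i] = [x for x in ((length - 1) // 2, length // 2) if x > 0]
--     return ans
-- ===== Notes on version B (the rewrite author's own statement) =====
-- stated objective: faster
-- what changed: Replaces the per-stall distance dictionary and the O(stalls) scan per person by a list of free-run lengths: each person takes the leftmost maximum run and splits it in two, so each step scans at most min(people,stalls)+1 runs and no per-stall state exists.
-- crash fix: On people <= 0 or stalls <= 0 A raises UnboundLocalError (its loop variables are never bound); B returns (-1, -1) meaning no stall was taken. — e.g. on start_allocation(0, 5): A raises UnboundLocalError, B returns (-1, -1)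
import Mathlib
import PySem

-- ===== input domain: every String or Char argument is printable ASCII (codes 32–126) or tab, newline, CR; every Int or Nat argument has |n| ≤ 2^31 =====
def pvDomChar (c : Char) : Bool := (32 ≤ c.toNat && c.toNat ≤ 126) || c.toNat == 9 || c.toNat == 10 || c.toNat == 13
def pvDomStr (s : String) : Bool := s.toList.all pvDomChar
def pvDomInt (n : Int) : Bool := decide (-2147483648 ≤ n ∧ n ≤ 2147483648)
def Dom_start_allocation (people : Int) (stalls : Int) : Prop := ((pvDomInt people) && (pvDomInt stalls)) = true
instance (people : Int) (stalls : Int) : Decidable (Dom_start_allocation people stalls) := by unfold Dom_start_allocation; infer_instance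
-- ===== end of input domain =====

-- B replaces A's per-stall distance dictionary by a list of free-run lengths (leftmost
-- maximum run split per person); equivalence is proved on people ≥ 1, stalls ≥ 1
-- (elsewhere A raises UnboundLocalError).

-- ===== PORT A =====
def calculate_right (empty_stall : Int) (right : Int) : Int := right - empty_stall

def calculate_left (start : Int) (empty_stall : Int) : Int := empty_stall - start

-- body of 'for stall in stall_min_max:' — state (cur_min, cur_max, the_stall)
def pvSelStep (d : PySem.Dict Int (List Int)) (st : Int × Int × Int) (stall : Int) : Int × Int × Int :=
  let left := PySem.List.pyGetD (d.getD stall []) 0 (-1)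
  let right := PySem.List.pyGetD (d.getD stall []) 1 (-1)
  let stall_min := min left right
  let stall_max := max left right
  if stall_min > st.1 || (stall_min == st.1 && stall_max > st.2.1) then
    (stall_min, stall_max, stall)
  else st

-- 'while((the_stall - stall_count) >= 0):' — fuel bounds the iteration count
def pvLeftLoop (the_stall : Int) (d : PySem.Dict Int (List Int)) (stall_count : Int) :
    Nat → PySem.Dict Int (List Int)
  | 0 => d
  | fuel + 1 =>
    if the_stall - stall_count ≥ 0 then
      let cur_stall := the_stall - stall_count
      let left_stall := d.getD cur_stall []
      if PySem.List.pyGetD left_stall 0 (-1) == -1 then d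
      else pvLeftLoop the_stall
        (d.insert cur_stall (PySem.List.pySetD left_stall 1 (the_stall - cur_stall - 1)))
        (stall_count + 1) fuel
    else d

-- 'while((stall_count + the_stall) < stalls):'
def pvRightLoop (stalls : Int) (the_stall : Int) (d : PySem.Dict Int (List Int)) (stall_count : Int) :
    Nat → PySem.Dict Int (List Int)
  | 0 => d
  | fuel + 1 =>
    if stall_count + the_stall < stalls then
      let cur_stall := the_stall + stall_count
      let right_stall := d.getD cur_stall []
      if PySem.List.pyGetD right_stall 0 (-1) == -1 then d
      else pvRightLoop stalls the_stall
        (d.insert cur_stall (PySem.List.pySetD right_stall 0 (cur_stall - the_stall - 1)))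
        (stall_count + 1) fuel
    else d

-- body of 'for person in range(0, people):' — state (d, the_stall, cur_max, cur_min)
def pvPersonStep (stalls : Int)
    (s : PySem.Dict Int (List Int) × Int × Int × Int) (_person : Int) :
    PySem.Dict Int (List Int) × Int × Int × Int :=
  let d := s.1
  let sel := d.keys.foldl (pvSelStep d) (-1, -1, s.2.1)
  let cur_min := sel.1
  let cur_max := sel.2.1
  let the_stall := sel.2.2
  let d := d.insert the_stall [-1, -1]
  let d := pvLeftLoop the_stall d 1 stalls.toNat
  let d := pvRightLoop stalls the_stall d 1 stalls.toNat
  (d, the_stall, cur_max, cur_min)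

def start_allocation (people : Int) (stalls : Int) : Int × Int :=
  let d0 := (PySem.List.pyRange 0 stalls 1).foldl
    (fun d stall => d.insert stall [calculate_left 0 stall, calculate_right stall (stalls - 1)])
    PySem.Dict.empty
  let fin := (PySem.List.pyRange 0 people 1).foldl (pvPersonStep stalls) (d0, 0, -1, -1)
  (fin.2.2.1, fin.2.2.2)

-- ===== PORT B =====
-- loop body when stalls remain — state (segs, ans)
def pvAltBody (s : List Int × (Int × Int)) : List Int × (Int × Int) :=
  let segs := s.1
  let m := (PySem.List.max? segs (fun x => x)).getD 0
  let i := (PySem.List.index? segs m).getD 0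
  let rest := segs.eraseIdx i
  let ans := (PySem.Int.floordiv m 2, PySem.Int.floordiv (m - 1) 2)
  let segs' := rest.take i ++
    ([PySem.Int.floordiv (m - 1) 2, PySem.Int.floordiv m 2].filter (fun x => decide (0 < x))) ++
    rest.drop i
  (segs', ans)

-- 'for _ in range(people):' with the 'if not segs: ans = (-1,-1); break' early exit
def pvAltGo (s : List Int × (Int × Int)) : List Int → List Int × (Int × Int)
  | [] => s
  | _ :: rest => if s.1.isEmpty then (s.1, (-1, -1)) else pvAltGo (pvAltBody s) rest

def start_allocation_alt (people : Int) (stalls : Int) : Int × Int :=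
  let segs0 : List Int := if stalls > 0 then [stalls] else []
  let fin := pvAltGo (segs0, (-1, -1)) (PySem.List.pyRange 0 people 1)
  fin.2

-- ===== PRECONDITION & SPEC =====
-- A raises UnboundLocalError when people ≤ 0 (no person loop iteration) or stalls ≤ 0
-- (empty dict, so the selection never binds the_stall); Pre_ excludes exactly those.
def Pre_start_allocation (people : Int) (stalls : Int) : Prop := 1 ≤ people ∧ 1 ≤ stalls
instance (people : Int) (stalls : Int) : Decidable (Pre_start_allocation people stalls) := by
  unfold Pre_start_allocation; infer_instance

def pvWitness_start_allocation : Int × Int := (3, 7)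

-- On people ≤ 0 or stalls ≤ 0, A raises UnboundLocalError; B returns (-1, -1) ("no stall taken").
def Raises_start_allocation (people : Int) (stalls : Int) : Prop := people ≤ 0 ∨ stalls ≤ 0
instance (people : Int) (stalls : Int) : Decidable (Raises_start_allocation people stalls) := by
  unfold Raises_start_allocation; infer_instance
def pvRaiseWitness_start_allocation : Int × Int := (0, 5)
def pvRaiseWitnessOut_start_allocation : Int × Int := (-1, -1)

def Spec_start_allocation (people : Int) (stalls : Int) (out : Int × Int) : Prop :=
  out = start_allocation_alt people stalls
instance (people : Int) (stalls : Int) (out : Int × Int) :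
    Decidable (Spec_start_allocation people stalls out) := by
  unfold Spec_start_allocation; infer_instance

-- ===== CLAIM (what is proved, stated in full; the proofs are below) =====
def Claim_equal_start_allocation : Prop := ∀ (people : Int) (stalls : Int),
  Dom_start_allocation people stalls → Pre_start_allocation people stalls →
  Spec_start_allocation people stalls (start_allocation people stalls)

def Claim_raises_start_allocation : Prop :=
  (∀ (people : Int) (stalls : Int), Dom_start_allocation people stalls →
    Raises_start_allocation people stalls → ¬ Pre_start_allocation people stalls) ∧
  (Dom_start_allocation (pvRaiseWitness_start_allocation.1) (pvRaiseWitness_start_allocation.2) ∧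
   Raises_start_allocation (pvRaiseWitness_start_allocation.1) (pvRaiseWitness_start_allocation.2) ∧
   start_allocation_alt (pvRaiseWitness_start_allocation.1) (pvRaiseWitness_start_allocation.2) =
     pvRaiseWitnessOut_start_allocation)

-- ===== LEMMAS AND PROOFS =====

-- one B iteration as a step function (the break returns the same value B stops with)
def pvAltStep (s : List Int × (Int × Int)) (_k : Int) : List Int × (Int × Int) :=
  if s.1.isEmpty then (s.1, (-1, -1)) else pvAltBody s

-- dict whose keys are exactly 0..stalls-1 with value function v
def pvMkD (stalls : Int) (v : Int → List Int) : PySem.Dict Int (List Int) :=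
  PySem.Dict.mk ((PySem.List.pyRange 0 stalls 1).map (fun i => (i, v i)))

-- abstract state: maximal free runs as (start, length), left to right
def pvWF (stalls : Int) (lo : Int) : List (Int × Int) → Prop
  | [] => True
  | p :: rest => lo ≤ p.1 ∧ 1 ≤ p.2 ∧ p.1 + p.2 ≤ stalls ∧ pvWF stalls (p.1 + p.2 + 1) rest

def pvVal (segs : List (Int × Int)) (i : Int) : List Int :=
  match segs.find? (fun p => decide (p.1 ≤ i) && decide (i < p.1 + p.2)) with
  | some p => [i - p.1, p.1 + p.2 - 1 - i]
  | none => [-1, -1]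

def pvKey (v : Int → List Int) (i : Int) : Int × Int :=
  (min (PySem.List.pyGetD (v i) 0 (-1)) (PySem.List.pyGetD (v i) 1 (-1)),
   max (PySem.List.pyGetD (v i) 0 (-1)) (PySem.List.pyGetD (v i) 1 (-1)))

def pvBeats (st : Int × Int × Int) (q : Int × Int) : Bool :=
  q.1 > st.1 || (q.1 == st.1 && q.2 > st.2.1)

def pvStep (v : Int → List Int) (st : Int × Int × Int) (i : Int) : Int × Int × Int :=
  if pvBeats st (pvKey v i) then ((pvKey v i).1, (pvKey v i).2, i) else st

def pvPeak (L : Int) : Int × Int := ((L - 1) / 2, L / 2)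

-- abstract selection: best (length, chosen stall) over the segments
def pvSelAbs (segs : List (Int × Int)) (M0 t0 : Int) : Int × Int :=
  segs.foldl (fun b p => if b.1 < p.2 then (p.2, p.1 + (p.2 - 1) / 2) else b) (M0, t0)

def pvRel (stalls : Int) (sA : PySem.Dict Int (List Int) × Int × Int × Int)
    (sB : List Int × (Int × Int)) : Prop :=
  ∃ segs, pvWF stalls 0 segs ∧ sA.1 = pvMkD stalls (pvVal segs) ∧
    sB.1 = segs.map (·.2) ∧ sB.2 = (sA.2.2.1, sA.2.2.2) ∧ 0 ≤ sA.2.1 ∧ sA.2.1 < stalls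

-- ---- basic dict lemmas ----
lemma pvMkD_keys (stalls : Int) (v : Int → List Int) :
    (pvMkD stalls v).keys = PySem.List.pyRange 0 stalls 1 := by
  have h : ((fun x : Int × List Int => x.1) ∘ fun i : Int => (i, v i)) = id := rfl
  simp only [pvMkD, PySem.Dict.keys, List.map_map, h, List.map_id]


lemma pv_getD_mk_map (v : Int → List Int) (l : List Int) (j : Int) (dflt : List Int)
    (hj : j ∈ l) :
    (PySem.Dict.mk (l.map (fun i => (i, v i)))).getD j dflt = v j := by
  induction l with
  | nil => simp at hj
  | cons a l ih =>
    rw [List.map_cons, PySem.Dict.getD_eq_get?_getD, PySem.Dict.get?_mk_cons]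
    by_cases h : a = j
    · subst h; simp
    · rcases List.mem_cons.mp hj with h' | h'
      · exact absurd h'.symm h
      · simp only [beq_iff_eq, if_neg h]
        rw [← PySem.Dict.getD_eq_get?_getD]
        exact ih h'


lemma pvMkD_getD (stalls : Int) (v : Int → List Int) (j : Int) (dflt : List Int)
    (h0 : 0 ≤ j) (h1 : j < stalls) : (pvMkD stalls v).getD j dflt = v j := by
  exact pv_getD_mk_map v _ j dflt (PySem.List.mem_pyRange_one.mpr ⟨h0, h1⟩)


lemma pvMkD_congr (stalls : Int) (v v' : Int → List Int)
    (h : ∀ i, 0 ≤ i → i < stalls → v i = v' i) : pvMkD stalls v = pvMkD stalls v' := by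
  apply PySem.Dict.ext
  show (PySem.List.pyRange 0 stalls 1).map _ = (PySem.List.pyRange 0 stalls 1).map _
  apply List.map_congr_left
  intro i hi
  obtain ⟨h0, h1⟩ := PySem.List.mem_pyRange_one.mp hi
  rw [h i h0 h1]


lemma pvMkD_insert (stalls : Int) (v : Int → List Int) (j : Int) (w : List Int)
    (h0 : 0 ≤ j) (h1 : j < stalls) :
    (pvMkD stalls v).insert j w = pvMkD stalls (fun i => if i = j then w else v i) := by
  apply PySem.Dict.ext
  have hcon : (pvMkD stalls v).contains j = true := by
    rw [PySem.Dict.contains_eq_decide_mem_keys, pvMkD_keys]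
    simp [PySem.List.mem_pyRange_one, h0, h1]
  rw [PySem.Dict.items_insert_of_contains (pvMkD stalls v) w hcon]
  show ((PySem.List.pyRange 0 stalls 1).map _).map _ = (PySem.List.pyRange 0 stalls 1).map _
  rw [List.map_map]
  apply List.map_congr_left
  intro i _
  by_cases hij : i = j
  · subst hij; simp
  · simp [Function.comp, hij]



-- ---- pvWF / pvVal lemmas ----
lemma pvWF_mono (stalls lo lo' : Int) (segs : List (Int × Int)) (h : pvWF stalls lo segs)
    (hle : lo' ≤ lo) : pvWF stalls lo' segs := by
  cases segs with
  | nil => trivial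
  | cons p rest =>
    obtain ⟨h1, h2, h3, h4⟩ := h
    exact ⟨by omega, h2, h3, h4⟩


lemma pvWF_nil_of_gt (stalls lo : Int) (segs : List (Int × Int)) (h : pvWF stalls lo segs)
    (hgt : stalls < lo) : segs = [] := by
  cases segs with
  | nil => rfl
  | cons p rest =>
    obtain ⟨h1, h2, h3, _⟩ := h
    omega


lemma pvVal_nil (i : Int) : pvVal [] i = [-1, -1] := by
  rfl


lemma pvVal_filled_of_lt (stalls lo i : Int) (segs : List (Int × Int))
    (h : pvWF stalls lo segs) (hi : i < lo) : pvVal segs i = [-1, -1] := by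
  induction segs generalizing lo with
  | nil => rfl
  | cons p rest ih =>
    obtain ⟨h1, h2, h3, h4⟩ := h
    unfold pvVal
    rw [List.find?_cons_of_neg (by simp; omega)]
    exact ih (p.1 + p.2 + 1) h4 (by omega)


lemma pvVal_head_in (a L i : Int) (rest : List (Int × Int)) (h1 : a ≤ i) (h2 : i < a + L) :
    pvVal ((a, L) :: rest) i = [i - a, a + L - 1 - i] := by
  unfold pvVal
  rw [List.find?_cons_of_pos (by simp; omega)]


lemma pvVal_tail (a L i : Int) (rest : List (Int × Int)) (h : ¬ (a ≤ i ∧ i < a + L)) :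
    pvVal ((a, L) :: rest) i = pvVal rest i := by
  unfold pvVal
  rw [List.find?_cons_of_neg (by simp; omega)]

lemma pv_d0_eq (stalls : Int) (h : 1 ≤ stalls) :
    (PySem.List.pyRange 0 stalls 1).foldl
      (fun d stall => d.insert stall [calculate_left 0 stall, calculate_right stall (stalls - 1)])
      PySem.Dict.empty = pvMkD stalls (pvVal [(0, stalls)]) := by
  apply PySem.Dict.ext
  rw [PySem.Dict.items_foldl_insert_fresh (PySem.List.pyRange 0 stalls 1) (fun i => i)
      (fun stall => [calculate_left 0 stall, calculate_right stall (stalls - 1)])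
      PySem.Dict.empty (fun a _ => PySem.Dict.contains_empty a)
      (by simpa using PySem.List.nodup_pyRange_one (a := (0:Int)) (b := stalls))]
  show [] ++ _ = _
  rw [List.nil_append]
  apply List.map_congr_left
  intro i hi
  obtain ⟨h0, h1⟩ := PySem.List.mem_pyRange_one.mp hi
  rw [pvVal_head_in 0 stalls i [] h0 (by omega)]
  simp only [calculate_left, calculate_right, Prod.mk.injEq, List.cons.injEq, and_true]
  exact ⟨trivial, trivial, by omega⟩


-- ---- selection fold ----
lemma pvSelStep_eq (stalls : Int) (v : Int → List Int) (st : Int × Int × Int) (i : Int)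
    (h0 : 0 ≤ i) (h1 : i < stalls) :
    pvSelStep (pvMkD stalls v) st i = pvStep v st i := by
  unfold pvSelStep pvStep pvBeats pvKey
  rw [pvMkD_getD stalls v i [] h0 h1]


lemma pvBeats_iff (st : Int × Int × Int) (q : Int × Int) :
    pvBeats st q = true ↔ (st.1 < q.1 ∨ (st.1 = q.1 ∧ st.2.1 < q.2)) := by
  simp only [pvBeats, Bool.or_eq_true, Bool.and_eq_true, decide_eq_true_eq, beq_iff_eq,
    gt_iff_lt]
  constructor
  · rintro (h | ⟨h1, h2⟩)
    · exact Or.inl h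
    · exact Or.inr ⟨h1.symm, h2⟩
  · rintro (h | ⟨h1, h2⟩)
    · exact Or.inl h
    · exact Or.inr ⟨h1.symm, h2⟩


lemma pvKey_pair (v : Int → List Int) (i x y : Int) (h : v i = [x, y]) :
    pvKey v i = (min x y, max x y) := by
  unfold pvKey
  rw [h]
  simp [PySem.List.pyGetD, PySem.List.pyGet?, PySem.List.pyIdx?]


lemma pvBeats_eq_decide (st : Int × Int × Int) (q : Int × Int) :
    pvBeats st q = decide (st.1 < q.1 ∨ (st.1 = q.1 ∧ st.2.1 < q.2)) := by
  by_cases h : (st.1 < q.1 ∨ (st.1 = q.1 ∧ st.2.1 < q.2))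
  · simp only [h, decide_true]
    exact (pvBeats_iff st q).mpr h
  · simp only [h, decide_false]
    exact Bool.eq_false_iff.mpr (fun hb => h ((pvBeats_iff st q).mp hb))

-- G1: no element beats the state
lemma pv_fold_keep (v : Int → List Int) (l : List Int) (st : Int × Int × Int)
    (h : ∀ i ∈ l, pvBeats st (pvKey v i) = false) : l.foldl (pvStep v) st = st := by
  induction l with
  | nil => rfl
  | cons a l ih =>
    rw [List.foldl_cons]
    have ha := h a (List.mem_cons_self)
    rw [show pvStep v st a = st by unfold pvStep; rw [ha]; simp]
    exact ih (fun i hi => h i (List.mem_cons_of_mem a hi))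


-- phase 1 over a free segment: strictly increasing keys up to the peak
lemma pv_fold_phase1 (v : Int → List Int) (a L : Int) (hL : 1 ≤ L)
    (hv : ∀ i, a ≤ i → i < a + L → v i = [i - a, a + L - 1 - i]) :
    ∀ (n : Nat) (c : Int) (st : Int × Int × Int), a ≤ c → c ≤ a + (L - 1) / 2 →
    c + n = a + (L - 1) / 2 + 1 →
    (PySem.List.pyRange c (a + (L - 1) / 2 + 1) 1).foldl (pvStep v) st =
      (if pvBeats st (pvPeak L) then ((pvPeak L).1, (pvPeak L).2, a + (L - 1) / 2) else st) := by
  intro n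
  induction n with
  | zero => intro c st h1 h2 h3; omega
  | succ n ih =>
    intro c st h1 h2 h3
    have hvc : v c = [c - a, a + L - 1 - c] := hv c h1 (by omega)
    have hkey : pvKey v c = (c - a, a + L - 1 - c) := by
      rw [pvKey_pair v c _ _ hvc]
      have hmn : min (c - a) (a + L - 1 - c) = c - a := by omega
      have hmx : max (c - a) (a + L - 1 - c) = a + L - 1 - c := by omega
      rw [hmn, hmx]
    rw [PySem.List.pyRange_one_cons (by omega), List.foldl_cons]
    rcases Nat.eq_zero_or_pos n with hn | hn
    · -- c is the peak position
      subst hn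
      have hc : c = a + (L - 1) / 2 := by omega
      have hpk : pvKey v c = pvPeak L := by
        rw [hkey]; unfold pvPeak
        have : c - a = (L - 1) / 2 := by omega
        have h2' : a + L - 1 - c = L / 2 := by omega
        rw [this, h2']
      rw [PySem.List.pyRange_one_eq_nil (by omega), List.foldl_nil]
      unfold pvStep
      rw [hpk, hc]
    · -- c is strictly before the peak
      have hkeylt : pvBeats (⟨(pvKey v c).1, (pvKey v c).2, c⟩ : Int × Int × Int) (pvPeak L) = true := by
        rw [pvBeats_eq_decide, decide_eq_true_eq]
        rw [hkey]
        unfold pvPeak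
        simp only
        omega
      have hstep : ∀ st' : Int × Int × Int, pvStep v st' c = st' ∨
          pvStep v st' c = ((pvKey v c).1, (pvKey v c).2, c) := by
        intro st'; unfold pvStep; split_ifs <;> simp
      rw [ih (c + 1) (pvStep v st c) (by omega) (by omega) (by omega)]
      cases hb : pvBeats st (pvPeak L) with
      | true =>
        rcases hstep st with he | he <;> rw [he]
        · rw [hb]
        · rw [hkeylt]; simp
      | false =>
        have hnb : pvStep v st c = st := by
          unfold pvStep
          rw [if_neg]
          intro hbt
          rw [pvBeats_eq_decide, decide_eq_true_eq] at hbt hkeylt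
          rw [pvBeats_eq_decide, decide_eq_false_iff_not] at hb
          rw [hkey] at hbt hkeylt
          unfold pvPeak at hkeylt hb
          simp only at hbt hkeylt hb
          omega
        rw [hnb, hb]

-- one whole free segment
lemma pv_fold_seg (v : Int → List Int) (a L M0 t0 : Int) (hL : 1 ≤ L) (hM0 : -1 ≤ M0)
    (hv : ∀ i, a ≤ i → i < a + L → v i = [i - a, a + L - 1 - i]) :
    (PySem.List.pyRange a (a + L) 1).foldl (pvStep v) ((pvPeak M0).1, (pvPeak M0).2, t0) =
      (if M0 < L then ((pvPeak L).1, (pvPeak L).2, a + (L - 1) / 2)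
       else ((pvPeak M0).1, (pvPeak M0).2, t0)) := by
  have hm0 : (0:Int) ≤ (L - 1) / 2 := by omega
  have hm1 : (L - 1) / 2 ≤ L - 1 := by omega
  rw [PySem.List.pyRange_one_append a (a + (L - 1) / 2 + 1) (a + L) (by omega) (by omega),
    List.foldl_append]
  rw [pv_fold_phase1 v a L hL hv ((L - 1) / 2 + 1).toNat a _ (le_refl a) (by omega) (by omega)]
  have hcond : pvBeats ((pvPeak M0).1, (pvPeak M0).2, t0) (pvPeak L) = decide (M0 < L) := by
    rw [pvBeats_eq_decide]
    apply decide_eq_decide.mpr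
    unfold pvPeak
    simp only
    omega
  rw [hcond]
  by_cases hML : M0 < L
  · rw [if_pos (decide_eq_true hML), if_pos hML]
    apply pv_fold_keep
    intro i hi
    obtain ⟨hi1, hi2⟩ := PySem.List.mem_pyRange_one.mp hi
    have hvi : v i = [i - a, a + L - 1 - i] := hv i (by omega) (by omega)
    have hkey : pvKey v i = (a + L - 1 - i, i - a) := by
      rw [pvKey_pair v i _ _ hvi]
      have hmn : min (i - a) (a + L - 1 - i) = a + L - 1 - i := by omega
      have hmx : max (i - a) (a + L - 1 - i) = i - a := by omega
      rw [hmn, hmx]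
    rw [hkey, pvBeats_eq_decide, decide_eq_false_iff_not]
    unfold pvPeak
    simp only
    omega
  · rw [if_neg (by simp [hML]), if_neg hML]
    apply pv_fold_keep
    intro i hi
    obtain ⟨hi1, hi2⟩ := PySem.List.mem_pyRange_one.mp hi
    have hvi : v i = [i - a, a + L - 1 - i] := hv i (by omega) (by omega)
    have hkey : pvKey v i = (a + L - 1 - i, i - a) := by
      rw [pvKey_pair v i _ _ hvi]
      have hmn : min (i - a) (a + L - 1 - i) = a + L - 1 - i := by omega
      have hmx : max (i - a) (a + L - 1 - i) = i - a := by omega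
      rw [hmn, hmx]
    rw [hkey, pvBeats_eq_decide, decide_eq_false_iff_not]
    unfold pvPeak
    simp only
    omega


-- full selection over all stalls
lemma pv_fold_sel (stalls : Int) (v : Int → List Int) :
    ∀ (segs : List (Int × Int)) (lo M0 t0 : Int), pvWF stalls lo segs → 0 ≤ lo → -1 ≤ M0 →
    (∀ i, lo ≤ i → i < stalls → v i = pvVal segs i) →
    (PySem.List.pyRange lo stalls 1).foldl (pvStep v) ((pvPeak M0).1, (pvPeak M0).2, t0) =
      ((pvPeak (pvSelAbs segs M0 t0).1).1, (pvPeak (pvSelAbs segs M0 t0).1).2,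
        (pvSelAbs segs M0 t0).2) := by
  intro segs
  induction segs with
  | nil =>
    intro lo M0 t0 _ hlo hM0 hv
    apply pv_fold_keep
    intro i hi
    obtain ⟨hi1, hi2⟩ := PySem.List.mem_pyRange_one.mp hi
    have hvi : v i = [-1, -1] := by rw [hv i hi1 hi2, pvVal_nil]
    rw [pvKey_pair v i _ _ hvi, pvBeats_eq_decide, decide_eq_false_iff_not]
    unfold pvPeak
    simp only [min_self, max_self]
    omega
  | cons p rest ih =>
    intro lo M0 t0 hWF hlo hM0 hv
    obtain ⟨hpa, hpL, hps, hrest⟩ := hWF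
    obtain ⟨a, L⟩ := p
    simp only at hpa hpL hps hrest ⊢
    -- split range: [lo, a) filled, [a, a+L) the segment, [a+L, stalls) the rest
    rw [PySem.List.pyRange_one_append lo a stalls (by omega) (by omega), List.foldl_append]
    have hkeep : (PySem.List.pyRange lo a 1).foldl (pvStep v)
        ((pvPeak M0).1, (pvPeak M0).2, t0) = ((pvPeak M0).1, (pvPeak M0).2, t0) := by
      apply pv_fold_keep
      intro i hi
      obtain ⟨hi1, hi2⟩ := PySem.List.mem_pyRange_one.mp hi
      have hvi : v i = [-1, -1] := by
        rw [hv i hi1 (by omega), pvVal_tail a L i rest (by omega)]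
        exact pvVal_filled_of_lt stalls (a + L + 1) i rest hrest (by omega)
      rw [pvKey_pair v i _ _ hvi, pvBeats_eq_decide, decide_eq_false_iff_not]
      unfold pvPeak
      simp only [min_self, max_self]
      omega
    rw [hkeep]
    rw [PySem.List.pyRange_one_append a (a + L) stalls (by omega) (by omega), List.foldl_append]
    have hseg := pv_fold_seg v a L M0 t0 hpL hM0 (fun i h1 h2 => by
      rw [hv i (by omega) (by omega)]
      exact pvVal_head_in a L i rest h1 h2)
    rw [hseg]
    have habs : pvSelAbs ((a, L) :: rest) M0 t0 =
        pvSelAbs rest (if M0 < L then L else M0) (if M0 < L then a + (L - 1) / 2 else t0) := by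
      unfold pvSelAbs
      rw [List.foldl_cons]
      split_ifs with h <;> rfl
    rw [habs]
    by_cases hend : a + L + 1 ≤ stalls
    · rw [PySem.List.pyRange_one_cons (by omega), List.foldl_cons]
      have hfilled : v (a + L) = [-1, -1] := by
        rw [hv (a + L) (by omega) (by omega), pvVal_tail a L (a + L) rest (by omega)]
        exact pvVal_filled_of_lt stalls (a + L + 1) (a + L) rest hrest (by omega)
      have hstepid : ∀ st' : Int × Int × Int, (st'.1, st'.2.1) = (pvPeak (if M0 < L then L else M0)) →
          pvStep v st' (a + L) = st' := by
        intro st' hpair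
        unfold pvStep
        rw [if_neg]
        rw [pvKey_pair v (a + L) _ _ hfilled, pvBeats_eq_decide, decide_eq_true_eq]
        have h1 : st'.1 = (pvPeak (if M0 < L then L else M0)).1 := by rw [← hpair]
        have h2 : st'.2.1 = (pvPeak (if M0 < L then L else M0)).2 := by rw [← hpair]
        rw [h1, h2]
        unfold pvPeak
        simp only [min_self, max_self]
        split_ifs <;> omega
      split_ifs with hML
      · rw [hstepid _ (by rw [if_pos hML])]
        exact ih (a + L + 1) L (a + (L - 1) / 2) hrest (by omega) (by omega) (fun i h1 h2 => by
          rw [hv i (by omega) h2]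
          exact pvVal_tail a L i rest (by omega))
      · rw [hstepid _ (by rw [if_neg hML])]
        exact ih (a + L + 1) M0 t0 hrest (by omega) hM0 (fun i h1 h2 => by
          rw [hv i (by omega) h2]
          exact pvVal_tail a L i rest (by omega))
    · have hrnil : rest = [] := pvWF_nil_of_gt stalls (a + L + 1) rest hrest (by omega)
      subst hrnil
      rw [PySem.List.pyRange_one_eq_nil (by omega), List.foldl_nil]
      unfold pvSelAbs
      rw [List.foldl_nil]
      split_ifs <;> rfl


-- ---- pvSelAbs characterisation ----
lemma pvSelAbs_keep (segs : List (Int × Int)) (M0 t0 : Int)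
    (h : ∀ p ∈ segs, p.2 ≤ M0) : pvSelAbs segs M0 t0 = (M0, t0) := by
  induction segs generalizing M0 t0 with
  | nil => rfl
  | cons p rest ih =>
    unfold pvSelAbs
    rw [List.foldl_cons, if_neg (by have := h p List.mem_cons_self; omega)]
    exact ih M0 t0 (fun q hq => h q (List.mem_cons_of_mem p hq))


lemma pvSelAbs_lt (segs : List (Int × Int)) (M0 t0 m : Int)
    (h : ∀ p ∈ segs, p.2 < m) (hM0 : M0 < m) : (pvSelAbs segs M0 t0).1 < m := by
  induction segs generalizing M0 t0 with
  | nil => exact hM0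
  | cons p rest ih =>
    unfold pvSelAbs
    rw [List.foldl_cons]
    by_cases hc : M0 < p.2
    · rw [if_pos hc]
      exact ih p.2 (p.1 + (p.2 - 1) / 2) (fun q hq => h q (List.mem_cons_of_mem p hq))
        (h p List.mem_cons_self)
    · rw [if_neg hc]
      exact ih M0 t0 (fun q hq => h q (List.mem_cons_of_mem p hq)) hM0


lemma pvSelAbs_split (spre ssuf : List (Int × Int)) (q : Int × Int) (M0 t0 m : Int)
    (hq : q.2 = m) (hpre : ∀ p ∈ spre, p.2 < m) (hsuf : ∀ p ∈ ssuf, p.2 ≤ m) (hM0 : M0 < m) :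
    pvSelAbs (spre ++ q :: ssuf) M0 t0 = (m, q.1 + (m - 1) / 2) := by
  unfold pvSelAbs
  rw [List.foldl_append, List.foldl_cons]
  have hlt : (pvSelAbs spre M0 t0).1 < m := pvSelAbs_lt spre M0 t0 m hpre hM0
  rw [show pvSelAbs spre M0 t0 = (List.foldl _ (M0, t0) spre) from rfl] at hlt
  rw [if_pos (by rw [hq]; exact hlt), hq]
  exact pvSelAbs_keep ssuf m (q.1 + (m - 1) / 2) (by intro p hp; exact hsuf p hp)


-- ---- while loops ----
lemma pvLeftLoop_spec (stalls : Int) (v' : Int → List Int) (a t : Int)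
    (ha : 0 ≤ a) (hat : a ≤ t) (hts : t < stalls)
    (hfree : ∀ i, a ≤ i → i < t → ∃ r, v' i = [i - a, r])
    (hwall : 1 ≤ a → v' (a - 1) = [-1, -1]) :
    ∀ (fuel : Nat) (c : Int), 1 ≤ c → c ≤ t - a + 1 → (t - a + 2 - c) ≤ fuel →
    pvLeftLoop t (pvMkD stalls (fun i => if t - c < i ∧ i < t then [i - a, t - 1 - i] else v' i)) c fuel =
      pvMkD stalls (fun i => if a ≤ i ∧ i < t then [i - a, t - 1 - i] else v' i) := by
  intro fuel
  induction fuel with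
  | zero => intro c h1 h2 h3; simp only [Nat.cast_zero] at h3; omega
  | succ fuel ih =>
    intro c h1 h2 h3
    by_cases hc : c ≤ t - a
    · have hcur0 : (0:Int) ≤ t - c := by omega
      have hcurs : t - c < stalls := by omega
      obtain ⟨r, hr⟩ := hfree (t - c) (by omega) (by omega)
      have hval : (pvMkD stalls
          (fun i => if t - c < i ∧ i < t then [i - a, t - 1 - i] else v' i)).getD (t - c) [] =
          [t - c - a, r] := by
        rw [pvMkD_getD _ _ _ _ hcur0 hcurs, if_neg (by omega), hr]
      simp only [pvLeftLoop]
      rw [if_pos (by omega : t - c ≥ 0), hval]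
      rw [show (PySem.List.pyGetD [t - c - a, r] 0 (-1) == (-1:Int)) = false from by
        simp [PySem.List.pyGetD, PySem.List.pyGet?, PySem.List.pyIdx?]; omega]
      rw [if_neg (by simp)]
      rw [show PySem.List.pySetD [t - c - a, r] 1 (t - (t - c) - 1) = [t - c - a, t - (t - c) - 1] from by
        simp [PySem.List.pySetD, PySem.List.pySet?, PySem.List.pyIdx?]]
      rw [pvMkD_insert stalls _ (t - c) _ hcur0 hcurs]
      rw [pvMkD_congr stalls _
        (fun i => if t - (c + 1) < i ∧ i < t then [i - a, t - 1 - i] else v' i)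
        (by
          intro i hi0 his
          beta_reduce
          by_cases hit : i = t - c
          · subst hit
            rw [if_pos rfl, if_pos (by omega)]
            have he2 : t - (t - c) - 1 = t - 1 - (t - c) := by omega
            rw [he2]
          · rw [if_neg hit]
            by_cases h' : t - (c + 1) < i ∧ i < t
            · rw [if_pos h', if_pos (by omega)]
            · rw [if_neg h', if_neg (by omega)])]
      exact ih (c + 1) (by omega) (by omega) (by push_cast at h3 ⊢; omega)
    · have hceq : c = t - a + 1 := by omega
      by_cases ha1 : 1 ≤ a
      · have hval : (pvMkD stalls
            (fun i => if t - c < i ∧ i < t then [i - a, t - 1 - i] else v' i)).getD (t - c) [] =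
            [-1, -1] := by
          rw [pvMkD_getD _ _ _ _ (by omega) (by omega), if_neg (by omega),
            show t - c = a - 1 by omega]
          exact hwall ha1
        simp only [pvLeftLoop]
        rw [if_pos (by omega : t - c ≥ 0), hval]
        rw [show (PySem.List.pyGetD [(-1:Int), -1] 0 (-1) == (-1:Int)) = true from by
          simp [PySem.List.pyGetD, PySem.List.pyGet?, PySem.List.pyIdx?]]
        rw [if_pos (by simp)]
        apply pvMkD_congr
        intro i hi0 his
        have : (t - c < i) ↔ (a ≤ i) := by omega
        by_cases h' : a ≤ i ∧ i < t
        · rw [if_pos (by omega), if_pos h']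
        · rw [if_neg (by omega), if_neg h']
      · simp only [pvLeftLoop]
        rw [if_neg (by omega : ¬ (t - c ≥ 0))]
        apply pvMkD_congr
        intro i hi0 his
        by_cases h' : a ≤ i ∧ i < t
        · rw [if_pos (by omega), if_pos h']
        · rw [if_neg (by omega), if_neg h']


lemma pvRightLoop_spec (stalls : Int) (v' : Int → List Int) (e t : Int)
    (ht : 0 ≤ t) (hte : t ≤ e - 1) (hes : e ≤ stalls)
    (hfree : ∀ i, t < i → i < e → ∃ x, v' i = [x, e - 1 - i] ∧ x ≠ -1)
    (hwall : e < stalls → v' e = [-1, -1]) :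
    ∀ (fuel : Nat) (c : Int), 1 ≤ c → c ≤ e - t → (e - t + 1 - c) ≤ fuel →
    pvRightLoop stalls t (pvMkD stalls (fun i => if t < i ∧ i < t + c then [i - t - 1, e - 1 - i] else v' i)) c fuel =
      pvMkD stalls (fun i => if t < i ∧ i < e then [i - t - 1, e - 1 - i] else v' i) := by
  intro fuel
  induction fuel with
  | zero => intro c h1 h2 h3; simp only [Nat.cast_zero] at h3; omega
  | succ fuel ih =>
    intro c h1 h2 h3
    by_cases hc : c ≤ e - t - 1
    · have hcur0 : (0:Int) ≤ t + c := by omega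
      have hcurs : t + c < stalls := by omega
      obtain ⟨x, hx, hxne⟩ := hfree (t + c) (by omega) (by omega)
      have hval : (pvMkD stalls
          (fun i => if t < i ∧ i < t + c then [i - t - 1, e - 1 - i] else v' i)).getD (t + c) [] =
          [x, e - 1 - (t + c)] := by
        rw [pvMkD_getD _ _ _ _ hcur0 hcurs, if_neg (by omega), hx]
      simp only [pvRightLoop]
      rw [if_pos (by omega : c + t < stalls), hval]
      rw [show (PySem.List.pyGetD [x, e - 1 - (t + c)] 0 (-1) == (-1:Int)) = false from by
        simp [PySem.List.pyGetD, PySem.List.pyGet?, PySem.List.pyIdx?]; exact hxne]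
      rw [if_neg (by simp)]
      rw [show PySem.List.pySetD [x, e - 1 - (t + c)] 0 (t + c - t - 1) =
          [t + c - t - 1, e - 1 - (t + c)] from by
        simp [PySem.List.pySetD, PySem.List.pySet?, PySem.List.pyIdx?]]
      rw [pvMkD_insert stalls _ (t + c) _ hcur0 hcurs]
      rw [pvMkD_congr stalls _
        (fun i => if t < i ∧ i < t + (c + 1) then [i - t - 1, e - 1 - i] else v' i)
        (by
          intro i hi0 his
          beta_reduce
          by_cases hit : i = t + c
          · subst hit
            rw [if_pos rfl, if_pos (by omega)]
          · rw [if_neg hit]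
            by_cases h' : t < i ∧ i < t + c
            · rw [if_pos h', if_pos (by omega)]
            · rw [if_neg h', if_neg (by omega)])]
      exact ih (c + 1) (by omega) (by omega) (by push_cast at h3 ⊢; omega)
    · have hceq : c = e - t := by omega
      by_cases hes : e < stalls
      · have hval : (pvMkD stalls
            (fun i => if t < i ∧ i < t + c then [i - t - 1, e - 1 - i] else v' i)).getD (t + c) [] =
            [-1, -1] := by
          rw [pvMkD_getD _ _ _ _ (by omega) (by omega), if_neg (by omega),
            show t + c = e by omega]
          exact hwall hes
        simp only [pvRightLoop]
        rw [if_pos (by omega : c + t < stalls), hval]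
        rw [show (PySem.List.pyGetD [(-1:Int), -1] 0 (-1) == (-1:Int)) = true from by
          simp [PySem.List.pyGetD, PySem.List.pyGet?, PySem.List.pyIdx?]]
        rw [if_pos (by simp)]
        apply pvMkD_congr
        intro i hi0 his
        by_cases h' : t < i ∧ i < e
        · rw [if_pos (by omega), if_pos h']
        · rw [if_neg (by omega), if_neg h']
      · simp only [pvRightLoop]
        rw [if_neg (by omega : ¬ (c + t < stalls))]
        apply pvMkD_congr
        intro i hi0 his
        by_cases h' : t < i ∧ i < e
        · rw [if_pos (by omega), if_pos h']
        · rw [if_neg (by omega), if_neg h']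



-- ---- pvWF structure lemmas ----
def pvAfter (lo : Int) : List (Int × Int) → Int
  | [] => lo
  | p :: r => pvAfter (p.1 + p.2 + 1) r

lemma pvWF_append_iff (stalls lo : Int) (xs ys : List (Int × Int)) :
    pvWF stalls lo (xs ++ ys) ↔ pvWF stalls lo xs ∧ pvWF stalls (pvAfter lo xs) ys := by
  induction xs generalizing lo with
  | nil => simp [pvWF, pvAfter]
  | cons p r ih =>
    show pvWF stalls lo (p :: (r ++ ys)) ↔ _
    constructor
    · rintro ⟨h1, h2, h3, h4⟩
      obtain ⟨ha, hb⟩ := (ih (p.1 + p.2 + 1)).mp h4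
      exact ⟨⟨h1, h2, h3, ha⟩, hb⟩
    · rintro ⟨⟨h1, h2, h3, ha⟩, hb⟩
      exact ⟨h1, h2, h3, (ih (p.1 + p.2 + 1)).mpr ⟨ha, hb⟩⟩

lemma pvWF_mem (stalls lo : Int) (xs : List (Int × Int)) (h : pvWF stalls lo xs) :
    ∀ p ∈ xs, lo ≤ p.1 ∧ 1 ≤ p.2 ∧ p.1 + p.2 ≤ stalls := by
  induction xs generalizing lo with
  | nil => intro p hp; simp at hp
  | cons q r ih =>
    obtain ⟨h1, h2, h3, h4⟩ := h
    intro p hp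
    rcases List.mem_cons.mp hp with hq | hr
    · subst hq; exact ⟨h1, h2, h3⟩
    · have := ih (q.1 + q.2 + 1) h4 p hr
      exact ⟨by omega, this.2.1, this.2.2⟩

lemma pvAfter_le (stalls lo : Int) (xs : List (Int × Int)) (h : pvWF stalls lo xs) :
    lo ≤ pvAfter lo xs := by
  induction xs generalizing lo with
  | nil => exact le_refl _
  | cons q r ih =>
    obtain ⟨h1, h2, h3, h4⟩ := h
    have := ih (q.1 + q.2 + 1) h4
    show lo ≤ pvAfter (q.1 + q.2 + 1) r
    omega

lemma pvAfter_mem (stalls lo : Int) (xs : List (Int × Int)) (h : pvWF stalls lo xs) :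
    ∀ p ∈ xs, p.1 + p.2 + 1 ≤ pvAfter lo xs := by
  induction xs generalizing lo with
  | nil => intro p hp; simp at hp
  | cons q r ih =>
    obtain ⟨h1, h2, h3, h4⟩ := h
    intro p hp
    rcases List.mem_cons.mp hp with hq | hr
    · subst hq
      exact pvAfter_le stalls (p.1 + p.2 + 1) r h4
    · exact ih (q.1 + q.2 + 1) h4 p hr

-- ---- pvVal via membership ----
lemma pvVal_eq_of_mem (stalls lo : Int) (segs : List (Int × Int)) (h : pvWF stalls lo segs)
    (p : Int × Int) (hp : p ∈ segs) (i : Int) (h1 : p.1 ≤ i) (h2 : i < p.1 + p.2) :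
    pvVal segs i = [i - p.1, p.1 + p.2 - 1 - i] := by
  induction segs generalizing lo with
  | nil => simp at hp
  | cons q rest ih =>
    obtain ⟨g1, g2, g3, g4⟩ := h
    rcases List.mem_cons.mp hp with hq | hr
    · subst hq
      unfold pvVal
      rw [List.find?_cons_of_pos (by simp; omega)]
    · have hps := pvWF_mem stalls (q.1 + q.2 + 1) rest g4 p hr
      unfold pvVal
      rw [List.find?_cons_of_neg (by simp; omega)]
      exact ih (q.1 + q.2 + 1) g4 hr
lemma pvVal_eq_filled (segs : List (Int × Int)) (i : Int)
    (h : ∀ p ∈ segs, ¬ (p.1 ≤ i ∧ i < p.1 + p.2)) : pvVal segs i = [-1, -1] := by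
  unfold pvVal
  rw [List.find?_eq_none.mpr ?_]
  intro p hp
  have := h p hp
  simp only [Bool.and_eq_true, decide_eq_true_eq]
  omega

lemma pv_eraseIdx_append {α : Type} (pre suf : List α) (m : α) :
    (pre ++ m :: suf).eraseIdx pre.length = pre ++ suf := by
  induction pre with
  | nil => rfl
  | cons a p ih => simpa using ih

lemma pv_map_filter (l : List (Int × Int)) :
    (l.filter (fun q => decide (0 < q.2))).map (fun q => q.2) =
      (l.map (fun q => q.2)).filter (fun x => decide (0 < x)) := by
  induction l with
  | nil => rfl
  | cons a t ih => by_cases h : 0 < a.2 <;> simp [h, ih]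

lemma pvWF_splice (stalls aq m : Int) (spre ssuf : List (Int × Int))
    (hWF : pvWF stalls 0 (spre ++ (aq, m) :: ssuf)) (hm : 1 ≤ m) :
    pvWF stalls 0 (spre ++ ([(aq, (m - 1) / 2), (aq + (m - 1) / 2 + 1, m / 2)].filter
      (fun p => decide (0 < p.2))) ++ ssuf) := by
  obtain ⟨hpre, hrest⟩ := (pvWF_append_iff stalls 0 spre ((aq, m) :: ssuf)).mp hWF
  obtain ⟨g1, g2, g3, g4⟩ := hrest
  simp only at g1 g2 g3 g4
  rw [List.append_assoc]
  refine (pvWF_append_iff stalls 0 spre _).mpr ⟨hpre, ?_⟩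
  rcases show m = 1 ∨ m = 2 ∨ 3 ≤ m by omega with hm1 | hm2 | hm3
  · have hf : [(aq, (m - 1) / 2), (aq + (m - 1) / 2 + 1, m / 2)].filter
        (fun p => decide (0 < p.2)) = [] := by
      subst hm1; rfl
    rw [hf, List.nil_append]
    exact pvWF_mono stalls (aq + m + 1) _ ssuf g4 (by omega)
  · have hf : [(aq, (m - 1) / 2), (aq + (m - 1) / 2 + 1, m / 2)].filter
        (fun p => decide (0 < p.2)) = [(aq + (m - 1) / 2 + 1, m / 2)] := by
      rw [List.filter_cons, List.filter_cons, List.filter_nil]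
      rw [if_neg (by simp; omega), if_pos (by simp; omega)]
    rw [hf]
    refine ⟨by dsimp only; omega, by dsimp only; omega, by dsimp only; omega, ?_⟩
    show pvWF stalls ((aq + (m - 1) / 2 + 1) + m / 2 + 1) ssuf
    rw [show (aq + (m - 1) / 2 + 1) + m / 2 + 1 = aq + m + 1 by omega]
    exact g4
  · have hf : [(aq, (m - 1) / 2), (aq + (m - 1) / 2 + 1, m / 2)].filter
        (fun p => decide (0 < p.2)) = [(aq, (m - 1) / 2), (aq + (m - 1) / 2 + 1, m / 2)] := by
      rw [List.filter_cons, List.filter_cons, List.filter_nil]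
      rw [if_pos (by simp; omega), if_pos (by simp; omega)]
    rw [hf]
    refine ⟨by dsimp only; omega, by dsimp only; omega, by dsimp only; omega,
            by dsimp only; omega, by dsimp only; omega, by dsimp only; omega, ?_⟩
    show pvWF stalls ((aq + (m - 1) / 2 + 1) + m / 2 + 1) ssuf
    rw [show (aq + (m - 1) / 2 + 1) + m / 2 + 1 = aq + m + 1 by omega]
    exact g4

-- the fill + two while loops, on an all-filled dict (more people than stalls)
lemma pv_dict_update_nil (stalls t0 : Int) (h0 : 0 ≤ t0) (h1 : t0 < stalls) :
    pvRightLoop stalls t0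
      (pvLeftLoop t0 ((pvMkD stalls (pvVal [])).insert t0 [-1, -1]) 1 stalls.toNat)
      1 stalls.toNat = pvMkD stalls (pvVal []) := by
  have hins : (pvMkD stalls (pvVal [])).insert t0 [-1, -1] = pvMkD stalls (pvVal []) := by
    rw [pvMkD_insert stalls _ t0 _ h0 h1]
    apply pvMkD_congr
    intro i _ _
    rw [pvVal_nil]
    split_ifs <;> rfl
  rw [hins]
  have hleft := pvLeftLoop_spec stalls (pvVal []) t0 t0 h0 (le_refl t0) h1
    (fun i hi1 hi2 => by omega)
    (fun _ => pvVal_nil (t0 - 1)) stalls.toNat 1 (le_refl 1) (by omega) (by omega)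
  have hl1 : pvMkD stalls (pvVal []) =
      pvMkD stalls (fun i => if t0 - 1 < i ∧ i < t0 then [i - t0, t0 - 1 - i] else pvVal [] i) := by
    apply pvMkD_congr; intro i _ _
    split_ifs
    all_goals first
      | rfl
      | (exfalso; omega)
  rw [hl1, hleft]
  have hl2 : pvMkD stalls (fun i => if t0 ≤ i ∧ i < t0 then [i - t0, t0 - 1 - i] else pvVal [] i) =
      pvMkD stalls (fun i => if t0 < i ∧ i < t0 + 1 then [i - t0 - 1, (t0 + 1) - 1 - i]
        else pvVal [] i) := by
    apply pvMkD_congr; intro i _ _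
    split_ifs
    all_goals first
      | rfl
      | (exfalso; omega)
  rw [hl2]
  have hright := pvRightLoop_spec stalls (pvVal []) (t0 + 1) t0 h0 (by omega) (by omega)
    (fun i hi1 hi2 => by omega)
    (fun _ => pvVal_nil (t0 + 1)) stalls.toNat 1 (le_refl 1) (by omega) (by omega)
  rw [hright]
  apply pvMkD_congr; intro i _ _
  split_ifs
  all_goals first
    | rfl
    | (exfalso; omega)

-- the fill + two while loops, splitting the selected segment (aq, m) at t = aq + (m-1)/2
lemma pv_dict_update (stalls aq m : Int) (spre ssuf : List (Int × Int))
    (hWF : pvWF stalls 0 (spre ++ (aq, m) :: ssuf)) (hm : 1 ≤ m) :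
    pvRightLoop stalls (aq + (m - 1) / 2)
      (pvLeftLoop (aq + (m - 1) / 2)
        ((pvMkD stalls (pvVal (spre ++ (aq, m) :: ssuf))).insert (aq + (m - 1) / 2) [-1, -1])
        1 stalls.toNat)
      1 stalls.toNat =
    pvMkD stalls (pvVal (spre ++ ([(aq, (m - 1) / 2), (aq + (m - 1) / 2 + 1, m / 2)].filter
      (fun p => decide (0 < p.2))) ++ ssuf)) := by
  obtain ⟨hpre, hrest⟩ := (pvWF_append_iff stalls 0 spre ((aq, m) :: ssuf)).mp hWF
  obtain ⟨g1, g2, g3, g4⟩ := hrest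
  simp only at g1 g2 g3 g4
  have hg0 : (0:Int) ≤ pvAfter 0 spre := pvAfter_le stalls 0 spre hpre
  have haq0 : (0:Int) ≤ aq := by omega
  have hspre : ∀ p ∈ spre, p.1 + p.2 + 1 ≤ aq := by
    intro p hp
    have := pvAfter_mem stalls 0 spre hpre p hp
    omega
  have hssuf : ∀ p ∈ ssuf, aq + m + 1 ≤ p.1 ∧ 1 ≤ p.2 := by
    intro p hp
    have := pvWF_mem stalls (aq + m + 1) ssuf g4 p hp
    exact ⟨this.1, this.2.1⟩
  have hqmem : ((aq, m) : Int × Int) ∈ spre ++ (aq, m) :: ssuf := by simp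
  set t : Int := aq + (m - 1) / 2 with ht
  have htb : aq ≤ t ∧ t ≤ aq + m - 1 ∧ t < stalls := by omega
  set segs : List (Int × Int) := spre ++ (aq, m) :: ssuf with hsegs
  rw [pvMkD_insert stalls _ t _ (by omega) (by omega)]
  set v1 : Int → List Int := fun i => if i = t then [-1, -1] else pvVal segs i with hv1
  have hvalseg : ∀ i, aq ≤ i → i < aq + m → pvVal segs i = [i - aq, aq + m - 1 - i] := by
    intro i h1 h2
    have := pvVal_eq_of_mem stalls 0 segs hWF (aq, m) hqmem i (by dsimp only; omega)
      (by dsimp only; omega)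
    simpa using this
  have hfree1 : ∀ i, aq ≤ i → i < t → ∃ r, v1 i = [i - aq, r] := by
    intro i h1 h2
    refine ⟨aq + m - 1 - i, ?_⟩
    rw [hv1]
    beta_reduce
    rw [if_neg (by omega)]
    exact hvalseg i h1 (by omega)
  have hwall1 : 1 ≤ aq → v1 (aq - 1) = [-1, -1] := by
    intro ha1
    rw [hv1]
    beta_reduce
    rw [if_neg (by omega)]
    apply pvVal_eq_filled
    intro p hp
    rw [hsegs] at hp
    rcases List.mem_append.mp hp with h | h
    · have := hspre p h; omega
    · rcases List.mem_cons.mp h with h' | h'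
      · rw [h']; dsimp only; omega
      · have := hssuf p h'; omega
  have e1 : pvMkD stalls v1 =
      pvMkD stalls (fun i => if t - 1 < i ∧ i < t then [i - aq, t - 1 - i] else v1 i) := by
    apply pvMkD_congr
    intro i _ _
    split_ifs
    all_goals first
      | rfl
      | (exfalso; omega)
  rw [e1, pvLeftLoop_spec stalls v1 aq t haq0 (by omega) (by omega) hfree1 hwall1
    stalls.toNat 1 (le_refl 1) (by omega) (by omega)]
  set v2 : Int → List Int := fun i => if aq ≤ i ∧ i < t then [i - aq, t - 1 - i] else v1 i with hv2
  have hfree2 : ∀ i, t < i → i < aq + m → ∃ x, v2 i = [x, (aq + m) - 1 - i] ∧ x ≠ -1 := by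
    intro i h1 h2
    refine ⟨i - aq, ?_, by omega⟩
    rw [hv2]
    beta_reduce
    rw [if_neg (by omega), hv1]
    beta_reduce
    rw [if_neg (by omega)]
    exact hvalseg i (by omega) h2
  have hwall2 : aq + m < stalls → v2 (aq + m) = [-1, -1] := by
    intro hes
    rw [hv2]
    beta_reduce
    rw [if_neg (by omega), hv1]
    beta_reduce
    rw [if_neg (by omega)]
    apply pvVal_eq_filled
    intro p hp
    rw [hsegs] at hp
    rcases List.mem_append.mp hp with h | h
    · have := hspre p h; omega
    · rcases List.mem_cons.mp h with h' | h'
      · rw [h']; dsimp only; omega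
      · have := hssuf p h'; omega
  have e2 : pvMkD stalls v2 =
      pvMkD stalls (fun i => if t < i ∧ i < t + 1 then [i - t - 1, (aq + m) - 1 - i] else v2 i) := by
    apply pvMkD_congr
    intro i _ _
    split_ifs
    all_goals first
      | rfl
      | (exfalso; omega)
  rw [e2, pvRightLoop_spec stalls v2 (aq + m) t (by omega) (by omega) (by omega) hfree2 hwall2
    stalls.toNat 1 (le_refl 1) (by omega) (by omega)]
  -- final pointwise comparison with the new segment list
  have hWF' := pvWF_splice stalls aq m spre ssuf hWF hm
  set pieces : List (Int × Int) :=
    [(aq, (m - 1) / 2), (aq + (m - 1) / 2 + 1, m / 2)].filter (fun p => decide (0 < p.2)) with hpieces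
  set segs' : List (Int × Int) := spre ++ pieces ++ ssuf with hsegs'
  have hsplit : (m - 1) / 2 + m / 2 = m - 1 := by omega
  apply pvMkD_congr
  intro i hi0 his
  by_cases c1 : t < i ∧ i < aq + m
  · rw [if_pos c1]
    have hmem2 : ((t + 1, m / 2) : Int × Int) ∈ segs' := by
      rw [hsegs']
      have hinp : ((t + 1, m / 2) : Int × Int) ∈ pieces := by
        rw [hpieces]
        exact List.mem_filter.mpr ⟨List.mem_cons_of_mem _ List.mem_cons_self, by simp; omega⟩
      exact List.mem_append.mpr (Or.inl (List.mem_append.mpr (Or.inr hinp)))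
    have := pvVal_eq_of_mem stalls 0 segs' hWF' (t + 1, m / 2) hmem2 i
      (by dsimp only; omega) (by dsimp only; omega)
    rw [this]
    dsimp only
    have hx : i - (t + 1) = i - t - 1 := by omega
    have hy : t + 1 + m / 2 - 1 - i = aq + m - 1 - i := by omega
    rw [hx, hy]
  · rw [if_neg c1]
    by_cases c2 : aq ≤ i ∧ i < t
    · rw [hv2]
      beta_reduce
      rw [if_pos c2]
      have hmem1 : ((aq, (m - 1) / 2) : Int × Int) ∈ segs' := by
        rw [hsegs']
        have hinp : ((aq, (m - 1) / 2) : Int × Int) ∈ pieces := by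
          rw [hpieces]
          exact List.mem_filter.mpr ⟨List.mem_cons_self, by simp; omega⟩
        exact List.mem_append.mpr (Or.inl (List.mem_append.mpr (Or.inr hinp)))
      have := pvVal_eq_of_mem stalls 0 segs' hWF' (aq, (m - 1) / 2) hmem1 i
        (by dsimp only; omega) (by dsimp only; omega)
      rw [this]
    · rw [hv2]
      beta_reduce
      rw [if_neg c2, hv1]
      beta_reduce
      by_cases c3 : i = t
      · rw [if_pos c3]
        symm
        apply pvVal_eq_filled
        intro p hp
        rw [hsegs', hpieces] at hp
        simp only [List.mem_append, List.mem_filter, List.mem_cons] at hp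
        rcases hp with (h | ⟨(h | h | h), hd⟩) | h
        · have := hspre p h; omega
        · rw [h]; dsimp only; omega
        · rw [h]; dsimp only; omega
        · simp at h
        · have := hssuf p h; omega
      · rw [if_neg c3]
        by_cases c4 : ∃ p, (p ∈ spre ∨ p ∈ ssuf) ∧ p.1 ≤ i ∧ i < p.1 + p.2
        · obtain ⟨p, hps, hc1, hc2⟩ := c4
          have hm1 : p ∈ segs := by
            rw [hsegs]
            rcases hps with h | h
            · exact List.mem_append.mpr (Or.inl h)
            · exact List.mem_append.mpr (Or.inr (List.mem_cons_of_mem _ h))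
          have hm2 : p ∈ segs' := by
            rw [hsegs']
            rcases hps with h | h
            · exact List.mem_append.mpr (Or.inl (List.mem_append.mpr (Or.inl h)))
            · exact List.mem_append.mpr (Or.inr h)
          rw [pvVal_eq_of_mem stalls 0 segs hWF p hm1 i hc1 hc2,
            pvVal_eq_of_mem stalls 0 segs' hWF' p hm2 i hc1 hc2]
        · have hnq : ¬ (aq ≤ i ∧ i < aq + m) := by omega
          rw [pvVal_eq_filled segs i ?_, pvVal_eq_filled segs' i ?_]
          · intro p hp
            rw [hsegs', hpieces] at hp
            simp only [List.mem_append, List.mem_filter, List.mem_cons] at hp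
            rcases hp with (h | ⟨(h | h | h), hd⟩) | h
            · exact fun hc => c4 ⟨p, Or.inl h, hc⟩
            · rw [h]; dsimp only; omega
            · rw [h]; dsimp only; omega
            · simp at h
            · exact fun hc => c4 ⟨p, Or.inr h, hc⟩
          · intro p hp
            rw [hsegs] at hp
            rcases List.mem_append.mp hp with h | h
            · exact fun hc => c4 ⟨p, Or.inl h, hc⟩
            · rcases List.mem_cons.mp h with h' | h'
              · rw [h']; dsimp only; omega
              · exact fun hc => c4 ⟨p, Or.inr h', hc⟩

-- ---- the per-person step preserves the relation ----
lemma pv_step_rel (stalls : Int) (hst : 1 ≤ stalls) (sA : PySem.Dict Int (List Int) × Int × Int × Int)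
    (sB : List Int × (Int × Int)) (k : Int) (h : pvRel stalls sA sB) :
    pvRel stalls (pvPersonStep stalls sA k) (pvAltStep sB k) := by
  obtain ⟨dA, tA, cmax, cmin⟩ := sA
  obtain ⟨lensB, ansB⟩ := sB
  obtain ⟨segs, hWF, hd, hlens, hans, ht0, ht1⟩ := h
  simp only at hd hlens hans ht0 ht1
  subst hd hlens hans
  have hpk : pvPeak (-1) = ((-1 : Int), (-1 : Int)) := by decide
  have hsel : (pvMkD stalls (pvVal segs)).keys.foldl
      (pvSelStep (pvMkD stalls (pvVal segs))) (-1, -1, tA) =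
      ((pvPeak (pvSelAbs segs (-1) tA).1).1, (pvPeak (pvSelAbs segs (-1) tA).1).2,
        (pvSelAbs segs (-1) tA).2) := by
    rw [pvMkD_keys]
    rw [PySem.List.foldl_congr_mem _ _ (pvStep (pvVal segs)) _ (by
      intro acc x hx
      obtain ⟨hx0, hx1⟩ := PySem.List.mem_pyRange_one.mp hx
      exact pvSelStep_eq stalls (pvVal segs) acc x hx0 hx1)]
    rw [show ((-1 : Int), (-1 : Int), tA) = ((pvPeak (-1)).1, (pvPeak (-1)).2, tA) by rw [hpk]]
    exact pv_fold_sel stalls (pvVal segs) segs 0 (-1) tA hWF le_rfl (by norm_num)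
      (fun i _ _ => rfl)
  by_cases hnil : segs = []
  · -- no free stall left: state unchanged, answer (-1, -1)
    subst hnil
    have habs : pvSelAbs [] (-1 : Int) tA = (-1, tA) := rfl
    unfold pvPersonStep pvAltStep pvAltBody
    dsimp only
    rw [hsel]
    simp only [habs, hpk, List.isEmpty_nil, List.map_nil, if_true]
    refine ⟨[], trivial, ?_, rfl, rfl, ht0, ht1⟩
    simp only
    exact pv_dict_update_nil stalls tA ht0 ht1
  · -- there is a free segment: the leftmost longest one is split
    have hmapne : segs.map (fun p => p.2) ≠ [] := by
      simpa using hnil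
    obtain ⟨m, hmax⟩ : ∃ m, PySem.List.max? (segs.map (fun p => p.2)) (fun x => x) = some m := by
      cases hm : PySem.List.max? (segs.map (fun p => p.2)) (fun x => x) with
      | none => exact absurd ((PySem.List.max?_eq_none_iff _ _).mp hm) hmapne
      | some m => exact ⟨m, rfl⟩
    have hmmem : m ∈ segs.map (fun p => p.2) := PySem.List.max?_mem hmax
    obtain ⟨k, hidx⟩ : ∃ k, PySem.List.index? (segs.map (fun p => p.2)) m = some k := by
      cases hk : PySem.List.index? (segs.map (fun p => p.2)) m with
      | none => exact absurd ((PySem.List.index?_eq_none_iff _ _).mp hk) (by simp [hmmem])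
      | some k => exact ⟨k, rfl⟩
    obtain ⟨pre, suf, hdecomp, hklen, hnotin⟩ := (PySem.List.index?_eq_some_iff _ _ _).mp hidx
    obtain ⟨spre, rest1, hsegs2, hpremap, hconsmap⟩ := List.map_eq_append_iff.mp hdecomp
    obtain ⟨q, ssuf, hrest1, hq2, hsufmap⟩ := List.map_eq_cons_iff.mp hconsmap
    subst hrest1
    have hsegs3 : segs = spre ++ (q.1, m) :: ssuf := by
      rw [hsegs2, show (q.1, m) = q by rw [← hq2]]

    have hWF3 : pvWF stalls 0 (spre ++ (q.1, m) :: ssuf) := by rw [← hsegs3]; exact hWF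
    have hqmem : ((q.1, m) : Int × Int) ∈ segs := by rw [hsegs3]; simp
    have hqb := pvWF_mem stalls 0 segs hWF (q.1, m) hqmem
    simp only at hqb
    obtain ⟨haq0, hm1, hqs⟩ := hqb
    have hpre_lt : ∀ p ∈ spre, p.2 < m := by
      intro p hp
      have hple : p.2 ≤ m := by
        apply PySem.List.max?_isMax hmax
        exact List.mem_map.mpr ⟨p, by rw [hsegs3]; simp [hp], rfl⟩
      have hpne : p.2 ≠ m := by
        intro he
        exact hnotin (by rw [← hpremap]; exact List.mem_map.mpr ⟨p, hp, he⟩)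
      omega
    have hsuf_le : ∀ p ∈ ssuf, p.2 ≤ m := by
      intro p hp
      apply PySem.List.max?_isMax hmax
      exact List.mem_map.mpr ⟨p, by rw [hsegs3]; simp [hp], rfl⟩
    have habs : pvSelAbs segs (-1) tA = (m, q.1 + (m - 1) / 2) := by
      rw [hsegs3]
      exact pvSelAbs_split spre ssuf (q.1, m) (-1) tA m rfl hpre_lt hsuf_le (by omega)
    -- the chosen stall
    have htb : 0 ≤ q.1 + (m - 1) / 2 ∧ q.1 + (m - 1) / 2 < stalls := by omega
    unfold pvPersonStep pvAltStep pvAltBody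
    dsimp only
    rw [hsel, habs]
    have hisempty : (segs.map (fun p => p.2)).isEmpty = false := by
      rw [hsegs3]; simp
    rw [hisempty]
    simp only [Bool.false_eq_true, if_false, hmax, Option.getD_some]
    simp only [hidx, Option.getD_some]
    -- B's list surgery
    have herase : (segs.map (fun p => p.2)).eraseIdx k = pre ++ suf := by
      rw [hdecomp, ← hklen]
      exact pv_eraseIdx_append pre suf m
    have htake : (pre ++ suf).take k = pre := by rw [← hklen]; simp
    have hdrop : (pre ++ suf).drop k = suf := by rw [← hklen]; simp
    rw [herase, htake, hdrop]
    have hfd1 : PySem.Int.floordiv m 2 = m / 2 := PySem.Int.floordiv_eq_ediv_of_pos (by norm_num)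
    have hfd2 : PySem.Int.floordiv (m - 1) 2 = (m - 1) / 2 :=
      PySem.Int.floordiv_eq_ediv_of_pos (by norm_num)
    rw [hfd1, hfd2]
    refine ⟨spre ++ ([((q.1 : Int), (m - 1) / 2), (q.1 + (m - 1) / 2 + 1, m / 2)].filter
      (fun p => decide (0 < p.2))) ++ ssuf, pvWF_splice stalls q.1 m spre ssuf hWF3 hm1, ?_, ?_, ?_, ?_, ?_⟩
    · simp only
      rw [hsegs3]
      exact pv_dict_update stalls q.1 m spre ssuf hWF3 hm1
    · simp only [List.map_append, pv_map_filter, hpremap, hsufmap, List.map_cons, List.map_nil]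
    · simp only [pvPeak]
    · simp only; omega
    · simp only; omega


-- A keeps looping over an all-filled dict once B has broken out of its loop
lemma pv_fold_rel_empty (stalls : Int) (hst : 1 ≤ stalls) :
    ∀ (l : List Int) (sA : PySem.Dict Int (List Int) × Int × Int × Int),
    pvRel stalls sA ([], (-1, -1)) →
    pvRel stalls (l.foldl (pvPersonStep stalls) sA) ([], (-1, -1)) := by
  intro l
  induction l with
  | nil => intro sA h; exact h
  | cons k rest ih =>
    intro sA h
    have h2 := pv_step_rel stalls hst sA ([], (-1, -1)) k h
    rw [show pvAltStep (([] : List Int), ((-1 : Int), (-1 : Int))) k =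
        (([] : List Int), ((-1 : Int), (-1 : Int))) from rfl] at h2
    exact ih _ h2

lemma pv_go_rel (stalls : Int) (hst : 1 ≤ stalls) :
    ∀ (l : List Int) (sA : PySem.Dict Int (List Int) × Int × Int × Int)
      (sB : List Int × (Int × Int)), pvRel stalls sA sB →
    pvRel stalls (l.foldl (pvPersonStep stalls) sA) (pvAltGo sB l) := by
  intro l
  induction l with
  | nil => intro sA sB h; exact h
  | cons k rest ih =>
    intro sA sB h
    by_cases he : sB.1.isEmpty = true
    · have h2 := pv_step_rel stalls hst sA sB k h
      rw [show pvAltStep sB k = (sB.1, (-1, -1)) from by unfold pvAltStep; rw [if_pos he]] at h2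
      have hb : sB.1 = [] := List.isEmpty_iff.mp he
      have hgo : pvAltGo sB (k :: rest) = (sB.1, (-1, -1)) := by
        show (if sB.1.isEmpty = true then (sB.1, ((-1 : Int), (-1 : Int)))
          else pvAltGo (pvAltBody sB) rest) = _
        rw [if_pos he]
      rw [List.foldl_cons, hgo, hb]
      rw [hb] at h2
      exact pv_fold_rel_empty stalls hst rest _ h2
    · have h2 := pv_step_rel stalls hst sA sB k h
      rw [show pvAltStep sB k = pvAltBody sB from by unfold pvAltStep; rw [if_neg he]] at h2
      have hgo : pvAltGo sB (k :: rest) = pvAltGo (pvAltBody sB) rest := by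
        show (if sB.1.isEmpty = true then (sB.1, ((-1 : Int), (-1 : Int)))
          else pvAltGo (pvAltBody sB) rest) = _
        rw [if_neg he]
      rw [List.foldl_cons, hgo]
      exact ih _ _ h2

-- ===== VERDICT (by name: the statement is the Claim_ definition above) =====
theorem start_allocation_spec : Claim_equal_start_allocation := by
  intro people stalls _ hpre
  obtain ⟨hp, hs⟩ := hpre
  have hinit : pvRel stalls
      ((PySem.List.pyRange 0 stalls 1).foldl
        (fun d stall => d.insert stall [calculate_left 0 stall, calculate_right stall (stalls - 1)])
        PySem.Dict.empty, 0, -1, -1)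
      ((if stalls > 0 then [stalls] else []), (-1, -1)) := by
    refine ⟨[(0, stalls)], ?_, ?_, ?_, rfl, le_refl 0, hs⟩
    · exact ⟨le_refl 0, hs, by omega, trivial⟩
    · exact pv_d0_eq stalls hs
    · simp [show stalls > 0 by omega]
  have hrel := pv_go_rel stalls hs (PySem.List.pyRange 0 people 1) _ _ hinit
  obtain ⟨segs, _, _, _, hans, _, _⟩ := hrel
  unfold Spec_start_allocation start_allocation start_allocation_alt
  exact hans.symm

theorem start_allocation_raises : Claim_raises_start_allocation := by
  unfold Claim_raises_start_allocation
  exact ⟨by intro p s _ h hp; unfold Raises_start_allocation at h; unfold Pre_start_allocation at hp; omega,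
         by decide⟩

theorem start_allocation_raises_ok :
    Raises_start_allocation pvRaiseWitness_start_allocation.1 pvRaiseWitness_start_allocation.2 :=
  start_allocation_raises.2.2.1
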